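-- pv_equiv track=rewrite | github.com/ljdursi/rosalind_chapel | LONG/long.py | dfs_traversals
-- ===== SOURCE A (Python) =====
-- def dfs_traversals(graph, start, curvisited):
--     visited = curvisited.copy()
--     visited.add(start)
--     neighbors = [(i, k) for i, k in graph[start] if i not in visited]
--     if len(neighbors) == 0:
--         return [[(start, None)]]
--     else:
--         traversals = []
--         for neighbor, overlap in neighbors:
--             subtraversals = dfs_traversals(graph, neighbor, visited)
--             traversals += [[(start, overlap)] + sub for sub in subtraversals]
--     return traversals
-- ===== SOURCE B (Python) =====
-- def dfs_traversals(graph, start, curvisited):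
--     # Explicit-stack worklist instead of recursion; return value identical to the recursive version.
--     results = []
--     stack = [(start, [], curvisited)]
--     while stack:
--         node, prefix, visited = stack.pop()
--         visited = visited | {node}
--         neighbors = [(i, k) for i, k in graph[node] if i not in visited]
--         if not neighbors:
--             results.append(prefix + [(node, None)])
--         else:
--             for i, k in reversed(neighbors):
--                 stack.append((i, prefix + [(node, k)], visited))
--     return results
-- ===== Notes on version B (the rewrite author's own statement) =====
-- stated objective: alternative
-- what changed: Replaces the recursive DFS with an explicit-stack worklist that carries (node, path-prefix, visited) frames and appends finished paths to an accumulator, pushing neighbors in reverse to keep the left-to-right path order.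
-- outside the precondition, e.g. on dfs_traversals({'a': [], 'b': [('x', 1)]}, 'a', set()): A returns [[('a', None)]], B returns [[('a', None)]]
import Mathlib
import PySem

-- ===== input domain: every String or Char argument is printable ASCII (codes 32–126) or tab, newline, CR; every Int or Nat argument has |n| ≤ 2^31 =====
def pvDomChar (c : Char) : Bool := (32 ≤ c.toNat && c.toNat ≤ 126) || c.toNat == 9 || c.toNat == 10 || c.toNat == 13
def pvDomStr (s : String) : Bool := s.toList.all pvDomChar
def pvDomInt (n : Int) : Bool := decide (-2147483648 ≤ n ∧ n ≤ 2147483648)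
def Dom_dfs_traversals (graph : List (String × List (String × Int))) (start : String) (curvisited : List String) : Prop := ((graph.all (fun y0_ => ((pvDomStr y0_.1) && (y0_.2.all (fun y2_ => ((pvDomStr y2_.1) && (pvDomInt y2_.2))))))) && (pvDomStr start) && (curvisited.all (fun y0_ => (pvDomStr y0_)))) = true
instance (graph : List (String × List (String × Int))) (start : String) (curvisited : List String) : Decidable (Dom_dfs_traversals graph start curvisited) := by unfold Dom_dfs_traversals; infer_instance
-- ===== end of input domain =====

-- Header: B replaces the recursion of A by an explicit-stack worklist (same cost, different decomposition);
-- equivalence is about the return value (neither version mutates its arguments observably: both copy the visited set).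

-- ===== PORT A =====
-- graph is a Python dict: lookup = first match in the association list; missing key = KeyError (excluded by Pre_, getD [] here).
def pvGraphAdj (graph : List (String × List (String × Int))) (k : String) : List (String × Int) :=
  match graph.find? (fun p => p.1 == k) with
  | some p => p.2
  | none => []

-- largest adjacency-list length (used only as a termination bound for the fuelled recursions)
def pvMaxAdj (graph : List (String × List (String × Int))) : Nat :=
  graph.foldl (fun m p => max m p.2.length) 0

theorem pv_le_foldl_max (l : List (String × List (String × Int))) (m : Nat) :
    m ≤ l.foldl (fun m p => max m p.2.length) m := by
  induction l generalizing m with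
  | nil => exact le_refl m
  | cons a l ih => exact le_trans (Nat.le_max_left _ _) (ih _)

theorem pv_mem_le_foldl_max (l : List (String × List (String × Int))) (m : Nat)
    (p : String × List (String × Int)) (hp : p ∈ l) :
    p.2.length ≤ l.foldl (fun m p => max m p.2.length) m := by
  induction l generalizing m with
  | nil => cases hp
  | cons a l ih =>
    cases hp with
    | head => exact le_trans (Nat.le_max_right _ _) (pv_le_foldl_max l _)
    | tail _ h => exact ih _ h

theorem pvGraphAdj_len_le (graph : List (String × List (String × Int))) (k : String) :
    (pvGraphAdj graph k).length ≤ pvMaxAdj graph := by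
  unfold pvGraphAdj pvMaxAdj
  cases h : graph.find? (fun p => p.1 == k) with
  | none => simp
  | some p => exact pv_mem_le_foldl_max graph 0 p (List.mem_of_find?_eq_some h)

-- literal transliteration of A's recursion, with a depth fuel (graph.length + 1 always suffices under Pre_)
def pvDfsA (graph : List (String × List (String × Int))) :
    Nat → String → PySem.Set String → List (List (String × Option Int))
  | 0, start, _ => [[(start, none)]]
  | f + 1, start, curvisited =>
    let visited := PySem.Set.add curvisited start
    let neighbors := (pvGraphAdj graph start).filter (fun p => !(PySem.Set.contains visited p.1))
    if neighbors.isEmpty then [[(start, none)]]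
    else
      neighbors.foldl
        (fun traversals p =>
          traversals ++ (pvDfsA graph f p.1 visited).map (fun sub => (start, some p.2) :: sub))
        []

def dfs_traversals (graph : List (String × List (String × Int))) (start : String) (curvisited : List String) : List (List (String × Option Int)) :=
  pvDfsA graph (graph.length + 1) start curvisited

-- ===== PORT B =====
-- worklist frame: (fuel, node, path prefix, visited); the stack's head is its top
-- (Python's stack.extend(reversed(neighbors)); stack.pop() from the end ≡ prepending the neighbor frames in order here).
def pvDfsBLoop (graph : List (String × List (String × Int))) :
    List (Nat × String × List (String × Option Int) × PySem.Set String) →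
    List (List (String × Option Int)) → List (List (String × Option Int))
  | [], results => results
  | (0, node, prefx, _) :: rest, results =>
    pvDfsBLoop graph rest (results ++ [prefx ++ [(node, none)]])
  | (f + 1, node, prefx, visited) :: rest, results =>
    let vis := PySem.Set.add visited node
    let nbrs := (pvGraphAdj graph node).filter (fun p => !(PySem.Set.contains vis p.1))
    if nbrs.isEmpty then pvDfsBLoop graph rest (results ++ [prefx ++ [(node, none)]])
    else
      pvDfsBLoop graph
        (nbrs.map (fun p => (f, p.1, prefx ++ [(node, some p.2)], vis)) ++ rest) results
  termination_by stack _ => ((stack.map (fun fr => (pvMaxAdj graph + 2) ^ fr.1)).sum)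
  decreasing_by
  · simp
  · simp
  · simp only [List.map_append, List.sum_append, List.map_cons, List.sum_cons, List.map_map,
      Function.comp_def, List.map_const', List.sum_replicate, smul_eq_mul]
    have hlen : (List.filter (fun p => !(PySem.Set.contains (PySem.Set.add visited node) p.1))
        (pvGraphAdj graph node)).length ≤ pvMaxAdj graph :=
      le_trans (List.length_filter_le _ _) (pvGraphAdj_len_le graph node)
    have hpow : 0 < (pvMaxAdj graph + 2) ^ f := Nat.pow_pos (by omega)
    have h3 : (List.filter (fun p => !(PySem.Set.contains (PySem.Set.add visited node) p.1))
        (pvGraphAdj graph node)).length * (pvMaxAdj graph + 2) ^ f < (pvMaxAdj graph + 2) ^ (f + 1) := by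
      calc _ ≤ pvMaxAdj graph * (pvMaxAdj graph + 2) ^ f := Nat.mul_le_mul_right _ hlen
        _ < (pvMaxAdj graph + 2) * (pvMaxAdj graph + 2) ^ f := by
            exact (Nat.mul_lt_mul_right hpow).mpr (by omega)
        _ = (pvMaxAdj graph + 2) ^ (f + 1) := by ring
    have h4 : (pvMaxAdj graph + 2) ^ f.succ = (pvMaxAdj graph + 2) ^ (f + 1) := rfl
    omega

def dfs_traversals_alt (graph : List (String × List (String × Int))) (start : String) (curvisited : List String) : List (List (String × Option Int)) :=
  pvDfsBLoop graph [(graph.length + 1, start, [], curvisited)] []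

-- ===== PRECONDITION & SPEC =====
-- Pre_ excludes the KeyError inputs: start must be a key and every listed neighbor must be a key,
-- already in curvisited, or its own list's key (then it is never looked up). Slightly conservative:
-- it also excludes some inputs whose missing-key neighbors sit in lists the DFS never reaches,
-- on which A still returns (see claim.json cites).
def Pre_dfs_traversals (graph : List (String × List (String × Int))) (start : String) (curvisited : List String) : Prop :=
  (graph.any (fun p => p.1 == start)) = true ∧
  (graph.all (fun p => p.2.all (fun q =>
    graph.any (fun r => r.1 == q.1) || curvisited.contains q.1 || (q.1 == p.1)))) = true
instance (graph : List (String × List (String × Int))) (start : String) (curvisited : List String) : Decidable (Pre_dfs_traversals graph start curvisited) := by unfold Pre_dfs_traversals; infer_instance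

def pvWitness_dfs_traversals : (List (String × List (String × Int))) × String × List String :=
  ([("a", [("b", 5), ("c", 7)]), ("b", [("a", 5), ("c", 3)]), ("c", [])], "a", [])

def Spec_dfs_traversals (graph : List (String × List (String × Int))) (start : String) (curvisited : List String) (out : List (List (String × Option Int))) : Prop := out = dfs_traversals_alt graph start curvisited
instance (graph : List (String × List (String × Int))) (start : String) (curvisited : List String) (out : List (List (String × Option Int))) : Decidable (Spec_dfs_traversals graph start curvisited out) := by unfold Spec_dfs_traversals; infer_instance

-- ===== CLAIM (what is proved, stated in full; the proofs are below) =====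
def Claim_equal_dfs_traversals : Prop := ∀ (graph : List (String × List (String × Int))) (start : String) (curvisited : List String), Dom_dfs_traversals graph start curvisited → Pre_dfs_traversals graph start curvisited → Spec_dfs_traversals graph start curvisited (dfs_traversals graph start curvisited)

-- ===== LEMMAS AND PROOFS =====

-- the worklist loop drains its stack into results, each frame contributing A's subtraversals prefixed by its path prefix
theorem pv_flatten_map {α β γ : Type} (F : α → List β) (G : β → γ) :
    ∀ l : List α, (l.flatMap F).map G = (l.map (fun x => (F x).map G)).flatten := by
  intro l
  induction l with
  | nil => simp
  | cons a l ih => simp [ih]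

-- the worklist loop drains its stack into results, each frame contributing A's subtraversals prefixed by its path prefix
theorem pvDfsBLoop_eq (graph : List (String × List (String × Int)))
    (stack : List (Nat × String × List (String × Option Int) × PySem.Set String))
    (results : List (List (String × Option Int))) :
    pvDfsBLoop graph stack results =
      results ++
        (stack.map (fun fr => (pvDfsA graph fr.1 fr.2.1 fr.2.2.2).map (fun s => fr.2.2.1 ++ s))).flatten := by
  induction stack, results using pvDfsBLoop.induct graph with
  | case1 results => simp [pvDfsBLoop]
  | case2 node prefx visited rest results ih =>
    simp only [pvDfsBLoop, ih, pvDfsA, List.map_cons, List.flatten_cons, List.map_nil]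
    simp
  | case3 f node prefx visited rest results vis nbrs he ih =>
    have he' : (List.filter (fun p => !(PySem.Set.contains (PySem.Set.add visited node) p.1))
        (pvGraphAdj graph node)).isEmpty = true := he
    have hA : pvDfsA graph (f + 1) node visited = [[(node, none)]] := by
      simp only [pvDfsA]
      rw [if_pos he']
    rw [pvDfsBLoop, if_pos he', ih]
    simp [hA]
  | case4 f node prefx visited rest results vis nbrs hne ih =>
    have hne' : ¬ (List.filter (fun p => !(PySem.Set.contains (PySem.Set.add visited node) p.1))
        (pvGraphAdj graph node)).isEmpty = true := hne
    have hA : pvDfsA graph (f + 1) node visited =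
        (List.filter (fun p => !(PySem.Set.contains (PySem.Set.add visited node) p.1))
            (pvGraphAdj graph node)).flatMap
          (fun p => (pvDfsA graph f p.1 (PySem.Set.add visited node)).map
            (fun sub => (node, some p.2) :: sub)) := by
      simp only [pvDfsA]
      rw [if_neg hne']
      exact PySem.List.foldl_append_eq_flatMap _ _ _
    rw [pvDfsBLoop, if_neg hne', ih]
    simp only [nbrs, vis]
    simp [hA, pv_flatten_map, List.map_map, Function.comp_def, List.append_assoc,
      PySem.Set.contains]

-- ===== VERDICT (by name: the statement is the Claim_ definition above) =====
theorem dfs_traversals_spec : Claim_equal_dfs_traversals := by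
  intro graph start curvisited _ _
  unfold Spec_dfs_traversals dfs_traversals dfs_traversals_alt
  rw [pvDfsBLoop_eq]
  simp
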